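-- pv_equiv track=rewrite | github.com/dmhaomoon/ner-three | seqlabel/metrics.py | label2entiy_idx
-- ===== SOURCE A (Python) =====
-- from collections import defaultdict
--
-- def label2entiy_idx(label):
--     entiys = defaultdict(list)
--     mark_l = []
--     last_tag = ''
--     for idx, l in enumerate(label):
--         if l == 'O':
--             if not mark_l:
--                 continue
--             tag_state = ''
--
--         else:
--             mark_l.append(str(idx))
--             tag_state, tag = l.split('_')
--             last_tag = tag
--
--         if tag_state in {'E', 'S'} or l == 'O':
--             entiys[last_tag].append((mark_l[0] + '-' + mark_l[-1]))
--             mark_l = []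
--
--     return entiys
-- ===== SOURCE B (Python) =====
-- from collections import defaultdict
--
--
-- def _run_events(run, closed):
--     # run: list of (idx, label) for one maximal block of consecutive non-'O' labels;
--     # closed: whether the block is terminated by an 'O' (a dangling block at the
--     # end of the sequence never emits its leftover segment).
--     events = []
--     start = None
--     tag = ''
--     for k, l in run:
--         if start is None:
--             start = k
--         state, tag = l.split('_')
--         if state in ('E', 'S'):
--             events.append((tag, str(start) + '-' + str(k)))
--             start = None
--     if closed and start is not None:
--         events.append((tag, str(start) + '-' + str(run[-1][0])))
--     return events
--
--
-- def _events(pairs):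
--     # split the enumerated sequence into maximal non-'O' runs and emit their events
--     events = []
--     while pairs:
--         if pairs[0][1] == 'O':
--             pairs = pairs[1:]
--             continue
--         run = []
--         while pairs and pairs[0][1] != 'O':
--             run.append(pairs[0])
--             pairs = pairs[1:]
--         events += _run_events(run, bool(pairs))
--     return events
--
--
-- def label2entiy_idx(label):
--     entiys = defaultdict(list)
--     for tag, span in _events(list(enumerate(label))):
--         entiys[tag].append(span)
--     return entiys
-- ===== Notes on version B (the rewrite author's own statement) =====
-- stated objective: alternative
-- what changed: A's single flat loop that mutates the dict, mark_l and last_tag in one pass is replaced by a staged pipeline: split the enumerated labels into maximal non-'O' runs, emit each run's (tag, span) events with a run-local start pointer, then group the event list into the defaultdict in a final pass.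
import Mathlib
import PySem

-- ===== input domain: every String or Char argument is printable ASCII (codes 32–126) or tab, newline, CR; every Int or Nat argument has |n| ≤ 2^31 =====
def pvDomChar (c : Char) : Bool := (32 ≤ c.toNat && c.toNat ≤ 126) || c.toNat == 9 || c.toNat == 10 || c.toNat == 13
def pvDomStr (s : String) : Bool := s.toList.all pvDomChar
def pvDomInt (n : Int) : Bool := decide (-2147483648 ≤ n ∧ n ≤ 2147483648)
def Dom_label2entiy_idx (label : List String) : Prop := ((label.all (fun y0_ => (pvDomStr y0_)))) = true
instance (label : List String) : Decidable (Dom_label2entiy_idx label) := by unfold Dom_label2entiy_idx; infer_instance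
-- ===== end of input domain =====

-- B re-decomposes A's single flat loop into passes (split into maximal non-'O' runs,
-- emit each run's spans, then group the events); same cost, alternative structure.

-- ===== PORT A =====
-- one step of A's loop; state = (entiys, mark_l, last_tag).
-- 'tag_state, tag = l.split('_')' is ported as head/second of the split pieces: exact when
-- the split has exactly 2 pieces, which Pre_ guarantees (Python raises ValueError otherwise).
def pvStepA (st : PySem.Dict String (List String) × List String × String) (p : Int × String) :
    PySem.Dict String (List String) × List String × String :=
  let d := st.1; let ml := st.2.1; let lt := st.2.2
  let l := p.2
  if l == "O" then
    if ml.isEmpty then st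
    else
      -- tag_state = '' ; 'tag_state in {E,S} or l == O' holds via l == 'O'
      (d.insert lt (d.getD lt [] ++ [ml.headD "" ++ "-" ++ ml.getLastD ""]), ([] : List String), lt)
  else
    let ml' := ml ++ [PySem.Int.toStr p.1]
    let parts := (PySem.Str.split? l "_").getD []
    let ts := parts.headD ""
    let tg := (parts.drop 1).headD ""
    if ts == "E" || ts == "S" then
      (d.insert tg (d.getD tg [] ++ [ml'.headD "" ++ "-" ++ ml'.getLastD ""]), ([] : List String), tg)
    else (d, ml', tg)

def label2entiy_idx (label : List String) : List (String × List String) :=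
  ((PySem.List.enumerate label).foldl pvStepA (PySem.Dict.empty, ([] : List String), "")).1.items

-- ===== PORT B =====
-- inner "while pairs and pairs[0][1] != 'O'": split off the leading maximal non-'O' run
def pvTakeRun : List (Int × String) → List (Int × String) × List (Int × String)
  | [] => ([], [])
  | (i, l) :: rest =>
    if l == "O" then ([], (i, l) :: rest)
    else
      let r := pvTakeRun rest
      ((i, l) :: r.1, r.2)

theorem pvTakeRun_snd_length_le : ∀ xs : List (Int × String), (pvTakeRun xs).2.length ≤ xs.length := by
  intro xs
  induction xs with
  | nil => simp [pvTakeRun]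
  | cons p rest ih =>
    obtain ⟨i, l⟩ := p
    simp only [pvTakeRun]
    split
    · simp
    · simpa using Nat.le_succ_of_le ih

-- the "for k, l in run" loop of _run_events; returns (events, start, tag)
def pvRunLoop : List (Int × String) → Option Int → String → List (String × String) × Option Int × String
  | [], start, tag => ([], start, tag)
  | (k, l) :: rest, start, _ =>
    let s := start.getD k
    let parts := (PySem.Str.split? l "_").getD []
    let state := parts.headD ""
    let tg := (parts.drop 1).headD ""
    if state == "E" || state == "S" then
      let r := pvRunLoop rest none tg
      ((tg, PySem.Int.toStr s ++ "-" ++ PySem.Int.toStr k) :: r.1, r.2)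
    else
      pvRunLoop rest (some s) tg

def pvRunEvents (run : List (Int × String)) (closed : Bool) : List (String × String) :=
  let r := pvRunLoop run none ""
  match closed, r.2.1, run.getLast? with
  | true, some s, some p => r.1 ++ [(r.2.2, PySem.Int.toStr s ++ "-" ++ PySem.Int.toStr p.1)]
  | _, _, _ => r.1

-- the outer "while pairs" loop of _events
def pvEventsB : List (Int × String) → List (String × String)
  | [] => []
  | (i, l) :: rest =>
    if l == "O" then pvEventsB rest
    else
      let r := pvTakeRun rest
      pvRunEvents ((i, l) :: r.1) (!r.2.isEmpty) ++ pvEventsB r.2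
  termination_by pairs => pairs.length
  decreasing_by
    · simp
    · have := pvTakeRun_snd_length_le rest; simp; omega

def label2entiy_idx_alt (label : List String) : List (String × List String) :=
  ((pvEventsB (PySem.List.enumerate label)).foldl
    (fun d (p : String × String) => d.insert p.1 (d.getD p.1 [] ++ [p.2]))
    PySem.Dict.empty).items

-- ===== PRECONDITION & SPEC =====
-- Pre_ excludes exactly the inputs where Python A raises ValueError: a non-'O' label whose
-- split on '_' does not give exactly two pieces (i.e. not exactly one '_').
def Pre_label2entiy_idx (label : List String) : Prop :=
  (label.all (fun l => l == "O" || PySem.Str.count l "_" == 1)) = true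
instance (label : List String) : Decidable (Pre_label2entiy_idx label) := by
  unfold Pre_label2entiy_idx; infer_instance
def pvWitness_label2entiy_idx : List String := ["B_x", "E_x", "O", "S_y", "I_y", "O"]

def Spec_label2entiy_idx (label : List String) (out : List (String × List String)) : Prop := out = label2entiy_idx_alt label
instance (label : List String) (out : List (String × List String)) : Decidable (Spec_label2entiy_idx label out) := by unfold Spec_label2entiy_idx; infer_instance

-- ===== CLAIM (what is proved, stated in full; the proofs are below) =====
def Claim_equal_label2entiy_idx : Prop := ∀ (label : List String), Dom_label2entiy_idx label → Pre_label2entiy_idx label → Spec_label2entiy_idx label (label2entiy_idx label)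

-- ===== LEMMAS AND PROOFS =====

-- tag_state / tag of a label, as A and B both compute them
def pvTS (l : String) : String := ((PySem.Str.split? l "_").getD []).headD ""
def pvTG (l : String) : String := ((((PySem.Str.split? l "_").getD [])).drop 1).headD ""

-- the sequence of (key, span) emissions A performs, as a pure list (proof-side helper)
def pvStepsA : List (Int × String) → List String → String → List (String × String)
  | [], _, _ => []
  | (i, l) :: rest, ml, lt =>
    if l == "O" then
      if ml.isEmpty then pvStepsA rest ml lt
      else (lt, ml.headD "" ++ "-" ++ ml.getLastD "") :: pvStepsA rest [] lt
    else
      let ml' := ml ++ [PySem.Int.toStr i]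
      if pvTS l == "E" || pvTS l == "S" then
        (pvTG l, ml'.headD "" ++ "-" ++ ml'.getLastD "") :: pvStepsA rest [] (pvTG l)
      else pvStepsA rest ml' (pvTG l)

def pvEmit (d : PySem.Dict String (List String)) (p : String × String) :
    PySem.Dict String (List String) :=
  d.insert p.1 (d.getD p.1 [] ++ [p.2])

-- Stage 1: A's fold produces exactly the dict obtained by grouping its emission sequence
theorem pv_fold_eq_group : ∀ (pairs : List (Int × String)) (d : PySem.Dict String (List String))
    (ml : List String) (lt : String),
    (pairs.foldl pvStepA (d, ml, lt)).1 = (pvStepsA pairs ml lt).foldl pvEmit d := by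
  intro pairs
  induction pairs with
  | nil => intro d ml lt; rfl
  | cons p rest ih =>
    intro d ml lt
    obtain ⟨i, l⟩ := p
    simp only [List.foldl_cons, pvStepA, pvStepsA, pvTS, pvTG]
    split
    · split
      · exact ih d ml lt
      · simp only [List.foldl_cons, pvEmit]; exact ih _ [] lt
    · split
      · simp only [List.foldl_cons, pvEmit]; exact ih _ [] _
      · exact ih _ _ _

-- equation lemmas for pvStepsA / pvRunLoop, in terms of pvTS/pvTG
theorem eqA_O_empty (i : Int) (rest : List (Int × String)) (lt : String) :
    pvStepsA ((i, "O") :: rest) [] lt = pvStepsA rest [] lt := by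
  simp [pvStepsA]

theorem eqA_O_cons (i : Int) (rest : List (Int × String)) (m : String) (ms : List String)
    (lt : String) :
    pvStepsA ((i, "O") :: rest) (m :: ms) lt
      = (lt, (m :: ms).headD "" ++ "-" ++ (m :: ms).getLastD "") :: pvStepsA rest [] lt := by
  simp [pvStepsA]

theorem eqA_nonO_emit (i : Int) (l : String) (rest : List (Int × String)) (ml : List String)
    (lt : String) (hl : (l == "O") = false) (hES : (pvTS l == "E" || pvTS l == "S") = true) :
    pvStepsA ((i, l) :: rest) ml lt
      = (pvTG l, (ml ++ [PySem.Int.toStr i]).headD "" ++ "-" ++ (ml ++ [PySem.Int.toStr i]).getLastD "")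
          :: pvStepsA rest [] (pvTG l) := by
  simp only [pvStepsA, hl, hES]
  simp

theorem eqA_nonO_noemit (i : Int) (l : String) (rest : List (Int × String)) (ml : List String)
    (lt : String) (hl : (l == "O") = false) (hES : (pvTS l == "E" || pvTS l == "S") = false) :
    pvStepsA ((i, l) :: rest) ml lt = pvStepsA rest (ml ++ [PySem.Int.toStr i]) (pvTG l) := by
  simp only [pvStepsA, hl, hES]
  simp

theorem eqL_emit (k : Int) (l : String) (rest : List (Int × String)) (start : Option Int)
    (tag : String) (hES : (pvTS l == "E" || pvTS l == "S") = true) :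
    pvRunLoop ((k, l) :: rest) start tag
      = ((pvTG l, PySem.Int.toStr (start.getD k) ++ "-" ++ PySem.Int.toStr k)
            :: (pvRunLoop rest none (pvTG l)).1,
         (pvRunLoop rest none (pvTG l)).2) := by
  have h : ((PySem.Str.split? l "_").getD []).head?.getD "" = "E"
      ∨ ((PySem.Str.split? l "_").getD []).head?.getD "" = "S" := by
    simpa [pvTS] using hES
  simp [pvRunLoop, pvTG]
  intro h1 h2
  rcases h with h | h
  · exact absurd h h1
  · exact absurd h h2

theorem eqL_noemit (k : Int) (l : String) (rest : List (Int × String)) (start : Option Int)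
    (tag : String) (hES : (pvTS l == "E" || pvTS l == "S") = false) :
    pvRunLoop ((k, l) :: rest) start tag = pvRunLoop rest (some (start.getD k)) (pvTG l) := by
  have h : ¬ ((PySem.Str.split? l "_").getD []).head?.getD "" = "E"
      ∧ ¬ ((PySem.Str.split? l "_").getD []).head?.getD "" = "S" := by
    simpa [pvTS] using hES
  simp [pvRunLoop, pvTG]
  intro hc
  rcases hc with hc | hc
  · exact absurd hc h.1
  · exact absurd hc h.2

-- the initial tag of pvRunLoop is dead on a nonempty run
theorem pvRunLoop_tag_irrel (k : Int) (l : String) (rest : List (Int × String))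
    (st : Option Int) (t1 t2 : String) :
    pvRunLoop ((k, l) :: rest) st t1 = pvRunLoop ((k, l) :: rest) st t2 := by
  simp only [pvRunLoop]

theorem pvTakeRun_append : ∀ xs : List (Int × String), (pvTakeRun xs).1 ++ (pvTakeRun xs).2 = xs := by
  intro xs
  induction xs with
  | nil => rfl
  | cons p rest ih =>
    obtain ⟨i, l⟩ := p
    simp only [pvTakeRun]
    split
    · rfl
    · simpa using ih

theorem pvTakeRun_fst_nonO : ∀ (xs : List (Int × String)) (p : Int × String),
    p ∈ (pvTakeRun xs).1 → p.2 ≠ "O" := by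
  intro xs
  induction xs with
  | nil => intro p h; simp [pvTakeRun] at h
  | cons q rest ih =>
    obtain ⟨i, l⟩ := q
    intro p h
    simp only [pvTakeRun] at h
    split at h
    · simp at h
    · rename_i hl
      simp only [List.mem_cons] at h
      rcases h with h | h
      · subst h; simpa using hl
      · exact ih p h

theorem pvTakeRun_snd_O : ∀ xs : List (Int × String),
    (pvTakeRun xs).2 = [] ∨ ∃ i r, (pvTakeRun xs).2 = (i, "O") :: r := by
  intro xs
  induction xs with
  | nil => left; rfl
  | cons q rest ih =>
    obtain ⟨i, l⟩ := q
    simp only [pvTakeRun]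
    split
    · rename_i hl
      right; exact ⟨i, rest, by simp at hl; simp [hl]⟩
    · simpa using ih

-- Core run lemma: over one run, A's emissions coincide with pvRunLoop's; A's residual
-- mark_l is idxs'.map toStr with head = the loop's final start and last = the run's last index
theorem pv_run_lemma : ∀ (run rest : List (Int × String)) (idxs : List Int) (lt : String),
    (∀ p ∈ run, p.2 ≠ "O") →
    ∃ idxs' : List Int,
      pvStepsA (run ++ rest) (idxs.map PySem.Int.toStr) lt
        = (pvRunLoop run idxs.head? lt).1
          ++ pvStepsA rest (idxs'.map PySem.Int.toStr) (pvRunLoop run idxs.head? lt).2.2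
      ∧ (pvRunLoop run idxs.head? lt).2.1 = idxs'.head?
      ∧ (idxs' ≠ [] → idxs'.getLast? = (idxs ++ run.map Prod.fst).getLast?) := by
  intro run
  induction run with
  | nil =>
    intro rest idxs lt _
    exact ⟨idxs, by simp [pvRunLoop], rfl, by simp⟩
  | cons q run' ih =>
    intro rest idxs lt hO
    obtain ⟨k, l⟩ := q
    have hl : (l == "O") = false := by
      simpa using hO (k, l) (List.mem_cons_self ..)
    have hO' : ∀ p ∈ run', p.2 ≠ "O" := fun p hp => hO p (List.mem_cons_of_mem _ hp)
    have hml : (idxs.map PySem.Int.toStr ++ [PySem.Int.toStr k])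
        = ((idxs ++ [k]).map PySem.Int.toStr) := by simp
    have hhead : ((idxs ++ [k]).map PySem.Int.toStr).headD ""
        = PySem.Int.toStr (idxs.head?.getD k) := by
      cases idxs <;> simp
    have hlast : ((idxs ++ [k]).map PySem.Int.toStr).getLastD "" = PySem.Int.toStr k := by
      simp
    cases hES : (pvTS l == "E" || pvTS l == "S") with
    | true =>
      obtain ⟨idxs', heq, hhd, hlst⟩ := ih rest ([] : List Int) (pvTG l) hO'
      simp only [List.head?_nil] at heq hhd
      refine ⟨idxs', ?_, ?_, ?_⟩
      · rw [List.cons_append, eqA_nonO_emit k l (run' ++ rest) _ lt hl hES,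
          eqL_emit k l run' idxs.head? lt hES]
        simp only [List.map_nil] at heq
        rw [hml, hhead, hlast, heq]
        simp
      · rw [eqL_emit k l run' idxs.head? lt hES]
        exact hhd
      · intro hne
        have h' := hlst hne
        have hrun' : run' ≠ [] := by
          intro h; subst h
          simp [pvRunLoop] at hhd
          cases idxs' with
          | nil => exact hne rfl
          | cons a t => simp at hhd
        rw [h']
        cases run' with
        | nil => exact absurd rfl hrun'
        | cons a t =>
          rw [List.nil_append]
          simp only [List.map_cons]
          rw [List.getLast?_append_of_ne_nil _ (by simp), List.getLast?_cons_cons]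
    | false =>
      obtain ⟨idxs', heq, hhd, hlst⟩ := ih rest (idxs ++ [k]) (pvTG l) hO'
      have hh : (idxs ++ [k]).head? = some (idxs.head?.getD k) := by cases idxs <;> simp
      rw [hh] at heq hhd
      refine ⟨idxs', ?_, ?_, ?_⟩
      · rw [List.cons_append, eqA_nonO_noemit k l (run' ++ rest) _ lt hl hES,
          eqL_noemit k l run' idxs.head? lt hES, hml, heq]
      · rw [eqL_noemit k l run' idxs.head? lt hES]
        exact hhd
      · intro hne
        have h' := hlst hne
        rw [h', List.append_assoc]
        simp
  
-- Stage 2: A's emission sequence (from a fresh mark_l, any last_tag) is B's event list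
theorem pv_steps_eq_events (pairs : List (Int × String)) (lt : String) :
    pvStepsA pairs [] lt = pvEventsB pairs := by
  cases hp : pairs with
  | nil => simp [pvStepsA, pvEventsB]
  | cons hd rest =>
    obtain ⟨i, l⟩ := hd
    by_cases hl : (l == "O") = true
    · have hlO : l = "O" := by simpa using hl
      subst hlO
      rw [eqA_O_empty, pv_steps_eq_events rest lt]
      simp [pvEventsB]
    · have hl' : (l == "O") = false := by simpa using hl
      have hrun : ∀ p ∈ (i, l) :: (pvTakeRun rest).1, p.2 ≠ "O" := by
        intro p hp'
        rcases List.mem_cons.mp hp' with h | h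
        · subst h; simpa using hl
        · exact pvTakeRun_fst_nonO rest p h
      obtain ⟨idxs', heq, hhd, hlst⟩ :=
        pv_run_lemma ((i, l) :: (pvTakeRun rest).1) (pvTakeRun rest).2 [] lt hrun
      have htag := pvRunLoop_tag_irrel i l (pvTakeRun rest).1 none lt ""
      simp only [List.head?_nil, List.map_nil, List.nil_append, htag] at heq hhd hlst
      have happ : ((i, l) :: (pvTakeRun rest).1) ++ (pvTakeRun rest).2 = (i, l) :: rest := by
        simpa using congrArg (List.cons (i, l)) (pvTakeRun_append rest)
      rw [happ] at heq
      have hgl : ((i, l) :: (pvTakeRun rest).1).getLast?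
          = some (((i, l) :: (pvTakeRun rest).1).getLast (by simp)) := by
        simp [List.getLast?_eq_getLast]
      simp only [pvEventsB, hl', Bool.false_eq_true, if_false, if_neg]
      rcases pvTakeRun_snd_O rest with h2 | ⟨j, r2, h2⟩
      · -- dangling run at the end of the sequence: no close, nothing after
        rw [heq, h2]
        simp only [pvStepsA, pvRunEvents, List.isEmpty_nil, Bool.not_true]
        simp [pvEventsB]
      · -- run closed by an 'O'
        have hlen : r2.length < rest.length := by
          have h := pvTakeRun_snd_length_le rest
          rw [h2] at h; simp at h; omega
        rw [heq, h2]
        cases hx : idxs' with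
        | nil =>
          -- mark_l is empty at the closing 'O': nothing emitted there
          rw [hx] at hhd
          simp only [List.map_nil] at *
          rw [eqA_O_empty, pv_steps_eq_events r2 _]
          simp only [pvRunEvents, hgl, hhd]
          simp [pvEventsB]
        | cons s t =>
          -- leftover segment closed under the run's final tag
          rw [hx] at hhd hlst
          have h' := hlst (by simp)
          rw [List.getLast?_map, hgl] at h'
          simp only [Option.map_some] at h'
          simp only [List.map_cons]
          rw [eqA_O_cons, pv_steps_eq_events r2 _]
          simp only [pvRunEvents, hgl, hhd]
          have hhd2 : (PySem.Int.toStr s :: t.map PySem.Int.toStr).headD "" = PySem.Int.toStr s := by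
            simp
          have hlast2 : (PySem.Int.toStr s :: t.map PySem.Int.toStr).getLastD ""
              = PySem.Int.toStr (((i, l) :: (pvTakeRun rest).1).getLast (by simp)).1 := by
            rw [List.getLastD_eq_getLast?, ← List.map_cons, List.getLast?_map, h']
            simp
          rw [hhd2, hlast2]
          simp [pvEventsB]
  termination_by pairs.length
  decreasing_by
    all_goals simp only [List.length_cons]; omega

-- ===== VERDICT (by name: the statement is the Claim_ definition above) =====
theorem label2entiy_idx_spec : Claim_equal_label2entiy_idx := by
  intro label _ _
  unfold Spec_label2entiy_idx label2entiy_idx label2entiy_idx_alt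
  rw [pv_fold_eq_group, pv_steps_eq_events]
  rfl
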